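-- pv_equiv track=rewrite | github.com/fengges/leetcode | 701-750/726. 原子的数量.py | spilit
-- ===== SOURCE A (Python) =====
-- def spilit(formula):
--     r=[]
--     size = len(formula)
--     i = 0
--     while i < size:
--         if formula[i] == ")" or formula[i] == "(":
--             r.append(formula[i])
--         elif formula[i].isdigit():
--             num = int(formula[i])
--             while i + 1 < size and formula[i + 1].isdigit():
--                 num = num * 10 + int(formula[i + 1])
--                 i += 1
--             r.append(str(num))
--         elif ord(formula[i]) >= ord('a') and ord(formula[i]) <= ord('z'):
--             r[-1]+=formula[i]
--         else:
--             r.append(formula[i])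
--         i+=1
--     return r
-- ===== SOURCE B (Python) =====
-- def spilit(formula):
--     # single flat pass with a pending-number register instead of A's
--     # index-based scan with an inner digit-absorbing while loop
--     r = []
--     num = None
--     for c in formula:
--         if c.isdigit():
--             num = (0 if num is None else num) * 10 + int(c)
--             continue
--         if num is not None:
--             r.append(str(num))
--             num = None
--         if 'a' <= c <= 'z':
--             r[-1] += c
--         else:
--             r.append(c)
--     if num is not None:
--         r.append(str(num))
--     return r
-- ===== Notes on version B (the rewrite author's own statement) =====
-- stated objective: alternative
-- what changed: Replaced A's index-based while loop with a nested digit-absorbing inner while by a single flat for-loop over the characters that keeps a pending-number register, flushed (as str(num)) at the first non-digit or at end of input.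
import Mathlib
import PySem

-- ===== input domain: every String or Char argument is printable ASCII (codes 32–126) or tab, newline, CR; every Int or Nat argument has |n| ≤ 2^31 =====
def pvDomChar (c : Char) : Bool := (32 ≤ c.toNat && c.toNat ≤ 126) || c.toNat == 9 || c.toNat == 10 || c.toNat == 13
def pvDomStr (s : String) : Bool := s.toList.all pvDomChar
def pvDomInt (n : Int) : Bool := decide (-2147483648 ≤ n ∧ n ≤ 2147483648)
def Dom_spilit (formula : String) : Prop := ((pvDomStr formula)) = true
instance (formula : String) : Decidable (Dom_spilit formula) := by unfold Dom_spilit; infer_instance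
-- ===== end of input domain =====

-- B is a single flat pass with a pending-number register; A is an index scan with an inner
-- digit-absorbing while loop.  A mutates nothing observable; equivalence is about the return value.

-- ===== PORT A =====
-- r[-1] += c ; on an empty r Python raises IndexError (excluded by Pre_), here a no-op.
def pvAppendLast (r : List String) (c : Char) : List String :=
  match r with
  | [] => []
  | h :: t => (h.push c) :: t

-- inner while: absorb following digits, returning (num, last digit index)
def pvAbsorbA (cs : List Char) (size : Nat) (i : Nat) (num : Int) : Int × Nat :=
  if _h : i + 1 < size ∧ (cs.getD (i + 1) ' ').isDigit then
    pvAbsorbA cs size (i + 1) (num * 10 + (((cs.getD (i + 1) ' ').toNat : Int) - 48))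
  else (num, i)
termination_by size - i

theorem pvAbsorbA_ge (cs : List Char) (size : Nat) (i : Nat) (num : Int) :
    i ≤ (pvAbsorbA cs size i num).2 := by
  induction i, num using (pvAbsorbA.induct cs size) with
  | case1 i num h ih =>
      rw [pvAbsorbA, dif_pos h]
      exact le_trans (Nat.le_succ i) ih
  | case2 i num h => rw [pvAbsorbA, dif_neg h]

-- outer while over the index, tokens accumulated in reverse
def pvLoopA (cs : List Char) (size : Nat) (i : Nat) (r : List String) : List String :=
  if _h : i < size then
    let c := cs.getD i ' '
    if c = ')' ∨ c = '(' then pvLoopA cs size (i + 1) (c.toString :: r)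
    else if c.isDigit then
      let p := pvAbsorbA cs size i ((c.toNat : Int) - 48)
      pvLoopA cs size (p.2 + 1) (PySem.Int.toStr p.1 :: r)
    else if 'a' ≤ c ∧ c ≤ 'z' then pvLoopA cs size (i + 1) (pvAppendLast r c)
    else pvLoopA cs size (i + 1) (c.toString :: r)
  else r.reverse
termination_by size - i
decreasing_by
  · omega
  · have := pvAbsorbA_ge cs size i ((((cs.getD i ' ').toNat : Int)) - 48); omega
  · omega
  · omega

def spilit (formula : String) : List String :=
  pvLoopA formula.toList formula.toList.length 0 []

-- ===== PORT B =====
-- B's r[-1] += c (IndexError on empty r in Python, excluded by Pre_; a no-op here)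
def pvAppendLastB (r : List String) (c : Char) : List String :=
  match r with
  | [] => []
  | h :: t => (h.push c) :: t

-- one step of B's for-loop: state = (tokens in reverse, pending number)
def pvStepB (st : List String × Option Int) (c : Char) : List String × Option Int :=
  if c.isDigit then
    (st.1, some ((st.2.getD 0) * 10 + ((c.toNat : Int) - 48)))
  else
    let r := match st.2 with
      | some n => PySem.Int.toStr n :: st.1
      | none => st.1
    if 'a' ≤ c ∧ c ≤ 'z' then (pvAppendLastB r c, none)
    else (c.toString :: r, none)

def pvFinishB (st : List String × Option Int) : List String :=
  (match st.2 with
   | some n => PySem.Int.toStr n :: st.1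
   | none => st.1).reverse

def spilit_alt (formula : String) : List String :=
  pvFinishB (formula.toList.foldl pvStepB ([], none))

-- ===== PRECONDITION & SPEC =====
-- Pre_ excludes strings whose FIRST character is a lowercase letter: there A executes
-- r[-1] += c with r empty and raises IndexError (B raises there too).
def Pre_spilit (formula : String) : Prop :=
  (formula.toList.take 1).all (fun c => !(decide ('a' ≤ c) && decide (c ≤ 'z'))) = true
instance (formula : String) : Decidable (Pre_spilit formula) := by unfold Pre_spilit; infer_instance

def pvWitness_spilit : String := "(H20)11Mg3"

def Spec_spilit (formula : String) (out : List String) : Prop := out = spilit_alt formula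
instance (formula : String) (out : List String) : Decidable (Spec_spilit formula out) := by unfold Spec_spilit; infer_instance

-- ===== CLAIM (what is proved, stated in full; the proofs are below) =====
def Claim_equal_spilit : Prop := ∀ (formula : String), Dom_spilit formula → Pre_spilit formula → Spec_spilit formula (spilit formula)

-- ===== LEMMAS AND PROOFS =====

theorem pvAppendLastB_eq (r : List String) (c : Char) :
    pvAppendLastB r c = pvAppendLast r c := by cases r <;> rfl

-- list-based reading of A's inner while
def pvAbsorbL (rest : List Char) (num : Int) : Int × List Char :=
  match rest with
  | [] => (num, [])
  | c :: t => if c.isDigit then pvAbsorbL t (num * 10 + ((c.toNat : Int) - 48)) else (num, c :: t)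

theorem pvAbsorbL_len (rest : List Char) (num : Int) :
    (pvAbsorbL rest num).2.length ≤ rest.length := by
  induction rest generalizing num with
  | nil => simp [pvAbsorbL]
  | cons c t ih =>
      simp only [pvAbsorbL]
      split
      · exact le_trans (ih _) (Nat.le_succ _)
      · simp

-- list-based reading of A's outer while
def pvListLoopA (l : List Char) (r : List String) : List String :=
  match _h : l with
  | [] => r.reverse
  | c :: t =>
    if c = ')' ∨ c = '(' then pvListLoopA t (c.toString :: r)
    else if c.isDigit then
      let p := pvAbsorbL t ((c.toNat : Int) - 48)
      pvListLoopA p.2 (PySem.Int.toStr p.1 :: r)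
    else if 'a' ≤ c ∧ c ≤ 'z' then pvListLoopA t (pvAppendLast r c)
    else pvListLoopA t (c.toString :: r)
termination_by l.length
decreasing_by
  · simp
  · have := pvAbsorbL_len t (((c.toNat : Int)) - 48); simp; omega
  · simp
  · simp

-- A's index-based absorb agrees with the list-based one on the tail
theorem pvAbsorbA_eq_L (cs : List Char) (i : Nat) (num : Int) :
    (pvAbsorbA cs cs.length i num).1 = (pvAbsorbL (cs.drop (i + 1)) num).1 ∧
    cs.drop ((pvAbsorbA cs cs.length i num).2 + 1) = (pvAbsorbL (cs.drop (i + 1)) num).2 := by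
  induction i, num using (pvAbsorbA.induct cs cs.length) with
  | case1 i num h ih =>
      rw [pvAbsorbA, dif_pos h]
      have hdrop : cs.drop (i + 1) = cs.getD (i + 1) ' ' :: cs.drop (i + 2) := by
        rw [List.drop_eq_getElem_cons h.1]
        simp [List.getD_eq_getElem?_getD, List.getElem?_eq_getElem h.1]
      rw [hdrop]
      simp only [pvAbsorbL, if_pos h.2]
      exact ih
  | case2 i num h =>
      rw [pvAbsorbA, dif_neg h]
      by_cases hi : i + 1 < cs.length
      · have hd : ¬ (cs.getD (i + 1) ' ').isDigit = true := by tauto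
        have hdrop : cs.drop (i + 1) = cs.getD (i + 1) ' ' :: cs.drop (i + 2) := by
          rw [List.drop_eq_getElem_cons hi]
          simp [List.getD_eq_getElem?_getD, List.getElem?_eq_getElem hi]
        rw [hdrop]
        simp only [pvAbsorbL, if_neg hd]
        exact ⟨trivial, trivial⟩
      · have : cs.drop (i + 1) = [] := List.drop_eq_nil_of_le (by omega)
        rw [this]
        simp [pvAbsorbL]

-- A's index loop is the list loop on the remaining suffix
theorem pvLoopA_eq_list (cs : List Char) (i : Nat) (r : List String) :
    pvLoopA cs cs.length i r = pvListLoopA (cs.drop i) r := by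
  induction hn : cs.length - i using Nat.strong_induction_on generalizing i r with
  | _ n ih =>
  by_cases hi : i < cs.length
  · have hdrop : cs.drop i = cs.getD i ' ' :: cs.drop (i + 1) := by
      rw [List.drop_eq_getElem_cons hi]
      simp [List.getD_eq_getElem?_getD, List.getElem?_eq_getElem hi]
    rw [pvLoopA, dif_pos hi, hdrop, pvListLoopA]
    set c := cs.getD i ' ' with hc
    by_cases h1 : c = ')' ∨ c = '('
    · rw [if_pos h1, if_pos h1]
      exact ih (cs.length - (i + 1)) (by omega) _ _ rfl
    · rw [if_neg h1, if_neg h1]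
      by_cases h2 : c.isDigit
      · rw [if_pos h2, if_pos h2]
        obtain ⟨he1, he2⟩ := pvAbsorbA_eq_L cs i ((c.toNat : Int) - 48)
        have hge := pvAbsorbA_ge cs cs.length i ((c.toNat : Int) - 48)
        show pvLoopA cs cs.length ((pvAbsorbA cs cs.length i ((c.toNat : Int) - 48)).2 + 1)
              (PySem.Int.toStr (pvAbsorbA cs cs.length i ((c.toNat : Int) - 48)).1 :: r) =
            pvListLoopA (pvAbsorbL (cs.drop (i + 1)) ((c.toNat : Int) - 48)).2
              (PySem.Int.toStr (pvAbsorbL (cs.drop (i + 1)) ((c.toNat : Int) - 48)).1 :: r)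
        rw [← he1, ← he2]
        by_cases hend : (pvAbsorbA cs cs.length i ((c.toNat : Int) - 48)).2 + 1 ≤ cs.length
        · exact ih (cs.length - ((pvAbsorbA cs cs.length i ((c.toNat : Int) - 48)).2 + 1))
            (by omega) _ _ rfl
        · have h1 : cs.drop ((pvAbsorbA cs cs.length i ((c.toNat : Int) - 48)).2 + 1) = [] :=
            List.drop_eq_nil_of_le (by omega)
          rw [pvLoopA, dif_neg (by omega), h1, pvListLoopA]
      · rw [if_neg h2, if_neg h2]
        by_cases h3 : 'a' ≤ c ∧ c ≤ 'z'
        · rw [if_pos h3, if_pos h3]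
          exact ih (cs.length - (i + 1)) (by omega) _ _ rfl
        · rw [if_neg h3, if_neg h3]
          exact ih (cs.length - (i + 1)) (by omega) _ _ rfl
  · rw [pvLoopA, dif_neg hi, List.drop_eq_nil_of_le (by omega), pvListLoopA]

-- folding B with a pending number first absorbs the digit run, then continues flushed
theorem pvFold_pending (t : List Char) (num : Int) (r : List String) :
    pvFinishB (t.foldl pvStepB (r, some num)) =
    pvFinishB ((pvAbsorbL t num).2.foldl pvStepB
      (PySem.Int.toStr (pvAbsorbL t num).1 :: r, none)) := by
  induction t generalizing num with
  | nil => simp [pvAbsorbL, pvFinishB]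
  | cons c t ih =>
      by_cases hd : c.isDigit
      · simp only [List.foldl_cons, pvAbsorbL, if_pos hd]
        have : pvStepB (r, some num) c = (r, some (num * 10 + ((c.toNat : Int) - 48))) := by
          simp [pvStepB, hd]
        rw [this]
        exact ih _
      · simp only [List.foldl_cons, pvAbsorbL, if_neg hd]
        have : pvStepB (r, some num) c = pvStepB (PySem.Int.toStr num :: r, none) c := by
          simp [pvStepB, hd]
        rw [this]

-- the list loop is B's fold
theorem pvListLoopA_eq_fold (l : List Char) (r : List String) :
    pvListLoopA l r = pvFinishB (l.foldl pvStepB (r, none)) := by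
  induction hn : l.length using Nat.strong_induction_on generalizing l r with
  | _ n ih =>
  match l with
  | [] => simp [pvListLoopA, pvFinishB]
  | c :: t =>
    rw [pvListLoopA]
    by_cases h1 : c = ')' ∨ c = '('
    · rw [if_pos h1]
      have hd : ¬ c.isDigit = true := by rcases h1 with h | h <;> subst h <;> decide
      have hl : ¬ ('a' ≤ c ∧ c ≤ 'z') := by rcases h1 with h | h <;> subst h <;> decide
      have : pvStepB (r, none) c = (c.toString :: r, none) := by
        simp [pvStepB, hd, hl]
      rw [List.foldl_cons, this]
      exact ih t.length (by subst hn; simp) t _ rfl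
    · rw [if_neg h1]
      by_cases h2 : c.isDigit
      · rw [if_pos h2]
        have : pvStepB (r, none) c = (r, some ((c.toNat : Int) - 48)) := by
          simp [pvStepB, h2, Option.getD]
        rw [List.foldl_cons, this, pvFold_pending]
        have hlen := pvAbsorbL_len t ((c.toNat : Int) - 48)
        show pvListLoopA (pvAbsorbL t ((c.toNat : Int) - 48)).2
              (PySem.Int.toStr (pvAbsorbL t ((c.toNat : Int) - 48)).1 :: r) = _
        exact ih (pvAbsorbL t ((c.toNat : Int) - 48)).2.length (by subst hn; simp; omega) _ _ rfl
      · rw [if_neg h2, List.foldl_cons]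
        by_cases h3 : 'a' ≤ c ∧ c ≤ 'z'
        · rw [if_pos h3]
          have : pvStepB (r, none) c = (pvAppendLast r c, none) := by
            simp [pvStepB, h2, h3, pvAppendLastB_eq]
          rw [this]
          exact ih t.length (by subst hn; simp) t _ rfl
        · rw [if_neg h3]
          have : pvStepB (r, none) c = (c.toString :: r, none) := by
            simp [pvStepB, h2, h3]
          rw [this]
          exact ih t.length (by subst hn; simp) t _ rfl

-- ===== VERDICT (by name: the statement is the Claim_ definition above) =====
theorem spilit_spec : Claim_equal_spilit := by
  intro formula _ _
  unfold Spec_spilit spilit spilit_alt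
  rw [pvLoopA_eq_list, List.drop_zero, pvListLoopA_eq_fold]
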